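-- pv_equiv track=rewrite | github.com/fairy26/Algorithm-Data-structure | src/chapter4/6_Areas_on_the_Cross-Section_Diagram.py | calcurate
-- ===== SOURCE A (Python) =====
-- def calcurate(string):
--     stack1 = []
--     stack2 = []
--     area = 0
--     for idx, char in enumerate(string):
--         if char == "\\":
--             stack1.append(idx)
--
--         elif char == "/":
--             if len(stack1) == 0:
--                 continue
--
--             j = stack1.pop()
--             area += idx - j
--             area_ = idx - j
--             while len(stack2) != 0 and stack2[-1][0] > j:
--                 area_ += stack2.pop()[1]
--             stack2.append((j, area_))
--
--     return area, stack2
-- ===== SOURCE B (Python) =====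
-- def calcurate(string):
--     # One nesting-aware stack instead of two flat stacks: each open backslash
--     # carries the list of ponds already completed inside it, so the backward
--     # merge scan over stack2 disappears; total area is summed once at the end.
--     stack = []      # entries: (backslash index, ponds completed inside it)
--     finished = []   # ponds closed while no backslash was open
--     for idx, ch in enumerate(string):
--         if ch == "\\":
--             stack.append((idx, []))
--         elif ch == "/" and stack:
--             j, inner = stack.pop()
--             pond = (j, (idx - j) + sum(a for _, a in inner))
--             (stack[-1][1] if stack else finished).append(pond)
--     ponds = finished + [p for _, inner in stack for p in inner]
--     return sum(a for _, a in ponds), ponds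
-- ===== Notes on version B (the rewrite author's own statement) =====
-- stated objective: alternative
-- what changed: A keeps two flat stacks and, on every matched slash, rescans stack2 backwards with a while loop to merge sub-ponds; B keeps a single nesting-aware stack whose open-backslash entries carry the ponds already completed inside them, so the backward merge scan disappears and the total area is summed once from the finished pond list instead of being accumulated per matched pair.
import Mathlib
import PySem

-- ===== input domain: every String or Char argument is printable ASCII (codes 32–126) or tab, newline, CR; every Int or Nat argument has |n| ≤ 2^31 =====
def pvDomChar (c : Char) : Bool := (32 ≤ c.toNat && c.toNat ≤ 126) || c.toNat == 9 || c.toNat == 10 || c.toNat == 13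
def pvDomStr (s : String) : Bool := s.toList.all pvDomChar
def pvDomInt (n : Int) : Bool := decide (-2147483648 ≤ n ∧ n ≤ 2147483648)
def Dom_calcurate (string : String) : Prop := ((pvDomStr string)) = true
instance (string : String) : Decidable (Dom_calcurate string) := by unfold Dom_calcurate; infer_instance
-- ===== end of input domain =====

-- B replaces A's two flat stacks and backward merge scan by one nesting-aware
-- stack whose open entries carry their completed inner ponds (objective: alternative decomposition).

-- ===== PORT A =====
-- A's inner while loop: pop stack2 entries from the end while their start > j, accumulating their areas
def pvMerge (stack2 : List (Int × Int)) (j area_ : Int) : List (Int × Int) × Int :=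
  match h : stack2.getLast? with
  | some p => if p.1 > j then pvMerge stack2.dropLast j (area_ + p.2) else (stack2, area_)
  | none => (stack2, area_)
termination_by stack2.length
decreasing_by
  have hne : stack2 ≠ [] := by intro e; rw [e] at h; simp at h
  have : stack2.length ≠ 0 := by simpa [List.length_eq_zero_iff]
  simp [List.length_dropLast]; omega

def calcA : List Char → Int → List Int → List (Int × Int) → Int → Int × (List (Int × Int))
  | [], _, _, stack2, area => (area, stack2)
  | c :: rest, idx, stack1, stack2, area =>
    if c = '\\' then calcA rest (idx + 1) (stack1 ++ [idx]) stack2 area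
    else if c = '/' then
      match stack1.getLast? with
      | none => calcA rest (idx + 1) stack1 stack2 area
      | some j =>
        let r := pvMerge stack2 j (idx - j)
        calcA rest (idx + 1) stack1.dropLast (r.1 ++ [(j, r.2)]) (area + (idx - j))
    else calcA rest (idx + 1) stack1 stack2 area

def calcurate (string : String) : Int × (List (Int × Int)) :=
  calcA string.toList 0 [] [] 0

-- ===== PORT B =====
-- sum(a for _, a in l)
def pvSumAreas (l : List (Int × Int)) : Int := l.foldl (fun a p => a + p.2) 0

def calcB : List Char → Int → List (Int × List (Int × Int)) → List (Int × Int) → Int × (List (Int × Int))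
  | [], _, stack, finished =>
    let ponds := finished ++ stack.flatMap (fun e => e.2)
    (pvSumAreas ponds, ponds)
  | c :: rest, idx, stack, finished =>
    if c = '\\' then calcB rest (idx + 1) (stack ++ [(idx, [])]) finished
    else if c = '/' then
      match stack.getLast? with
      | none => calcB rest (idx + 1) stack finished
      | some e =>
        let pond : Int × Int := (e.1, (idx - e.1) + pvSumAreas e.2)
        let stack' := stack.dropLast
        match stack'.getLast? with
        | none => calcB rest (idx + 1) stack' (finished ++ [pond])
        | some e2 => calcB rest (idx + 1) (stack'.dropLast ++ [(e2.1, e2.2 ++ [pond])]) finished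
    else calcB rest (idx + 1) stack finished

def calcurate_alt (string : String) : Int × (List (Int × Int)) :=
  calcB string.toList 0 [] []

-- ===== PRECONDITION & SPEC =====
def Spec_calcurate (string : String) (out : Int × (List (Int × Int))) : Prop := out = calcurate_alt string
instance (string : String) (out : Int × (List (Int × Int))) : Decidable (Spec_calcurate string out) := by unfold Spec_calcurate; infer_instance

-- ===== CLAIM (what is proved, stated in full; the proofs are below) =====
def Claim_equal_calcurate : Prop := ∀ (string : String), Dom_calcurate string → Spec_calcurate string (calcurate string)

-- ===== LEMMAS AND PROOFS =====

-- flattened ponds of B's stack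
def pvFlat (st : List (Int × List (Int × Int))) : List (Int × Int) := st.flatMap (fun e => e.2)
-- all indices recorded in B's stack, in event order
def pvChain (st : List (Int × List (Int × Int))) : List Int :=
  st.flatMap (fun e => e.1 :: e.2.map Prod.fst)

theorem pvSumAreas_foldl (l : List (Int × Int)) (a : Int) :
    l.foldl (fun a p => a + p.2) a = a + (l.map Prod.snd).sum := by
  induction l generalizing a with
  | nil => simp
  | cons p t ih => simp [List.foldl_cons, ih]; ring

theorem pvSumAreas_eq (l : List (Int × Int)) : pvSumAreas l = (l.map Prod.snd).sum := by
  simpa [pvSumAreas] using pvSumAreas_foldl l 0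

theorem pvMerge_spec (I P : List (Int × Int)) (j a : Int)
    (hI : ∀ p ∈ I, j < p.1) (hP : ∀ p ∈ P, p.1 < j) :
    pvMerge (P ++ I) j a = (P, a + pvSumAreas I) := by
  induction I using List.reverseRecOn generalizing a with
  | nil =>
    rw [List.append_nil, pvMerge]
    split
    · rename_i p hL
      have := hP p (List.mem_of_getLast? hL)
      rw [if_neg (by omega)]
      simp [pvSumAreas]
    · simp [pvSumAreas]
  | append_singleton I' p ih =>
    rw [pvMerge]
    split
    · rename_i q hL
      have hq : p = q := by simpa using hL
      subst hq
      rw [if_pos (hI p (by simp))]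
      have hd : (P ++ (I' ++ [p])).dropLast = P ++ I' := by simp
      rw [hd, ih _ (fun r hr => hI r (by simp [hr]))]
      have hs : pvSumAreas (I' ++ [p]) = pvSumAreas I' + p.2 := by simp [pvSumAreas_eq]
      rw [hs]
      have : a + p.2 + pvSumAreas I' = a + (pvSumAreas I' + p.2) := by ring
      rw [this]
    · rename_i hL
      simp at hL

-- the joint invariant
def pvInv (idx : Int) (stack1 : List Int) (stack2 : List (Int × Int)) (area : Int)
    (stack : List (Int × List (Int × Int))) (finished : List (Int × Int)) : Prop :=
  stack1 = stack.map Prod.fst ∧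
  stack2 = finished ++ pvFlat stack ∧
  area = pvSumAreas stack2 ∧
  List.Pairwise (· < ·) (finished.map Prod.fst ++ pvChain stack) ∧
  ∀ x ∈ finished.map Prod.fst ++ pvChain stack, x < idx

theorem pvMem_chain_of_flat (st : List (Int × List (Int × Int))) (p : Int × Int)
    (hp : p ∈ pvFlat st) : p.1 ∈ pvChain st := by
  simp only [pvFlat, List.mem_flatMap] at hp
  obtain ⟨e, he, hpe⟩ := hp
  simp only [pvChain, List.mem_flatMap]
  exact ⟨e, he, by simp only [List.mem_cons, List.mem_map]; right; exact ⟨p, hpe, rfl⟩⟩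

theorem pvPairSplit (C M : List Int) (j : Int)
    (h : List.Pairwise (· < ·) (C ++ j :: M)) :
    (∀ x ∈ C, x < j) ∧ (∀ y ∈ M, j < y) := by
  rw [List.pairwise_append] at h
  obtain ⟨_, hjm, hcm⟩ := h
  exact ⟨fun x hx => hcm x hx j (by simp), (List.pairwise_cons.mp hjm).1⟩

theorem pvSublistCons (C M : List Int) (j : Int) : List.Sublist (C ++ [j]) (C ++ j :: M) :=
  (List.append_sublist_append_left C).mpr ((List.nil_sublist M).cons₂ j)

theorem pvMain (cs : List Char) (idx : Int) (stack1 : List Int) (stack2 : List (Int × Int))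
    (area : Int) (stack : List (Int × List (Int × Int))) (finished : List (Int × Int))
    (h : pvInv idx stack1 stack2 area stack finished) :
    calcA cs idx stack1 stack2 area = calcB cs idx stack finished := by
  induction cs generalizing idx stack1 stack2 area stack finished with
  | nil =>
    obtain ⟨h1, h2, h3, _, _⟩ := h
    subst h1 h2
    simp [calcA, calcB, pvFlat, h3]
  | cons c rest ih =>
    obtain ⟨h1, h2, h3, h4, h5⟩ := h
    subst h1 h2
    by_cases hb : c = '\\'
    · simp only [calcA, calcB, if_pos hb]
      apply ih
      refine ⟨by simp, by simp [pvFlat], h3, ?_, ?_⟩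
      · have : pvChain (stack ++ [(idx, [])]) = pvChain stack ++ [idx] := by
          simp [pvChain]
        rw [this, ← List.append_assoc, List.pairwise_append]
        refine ⟨h4, by simp, ?_⟩
        intro x hx y hy
        simp at hy
        subst hy
        exact h5 x hx
      · intro x hx
        have : pvChain (stack ++ [(idx, [])]) = pvChain stack ++ [idx] := by
          simp [pvChain]
        rw [this, ← List.append_assoc] at hx
        rcases List.mem_append.mp hx with hx | hx
        · have := h5 x hx; omega
        · simp at hx; omega
    · by_cases hsl : c = '/'
      · simp only [calcA, calcB, if_neg hb, if_pos hsl]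
        rcases stack.eq_nil_or_concat with rfl | ⟨st', e, rfl⟩
        · simp only [List.map_nil, List.getLast?_nil]
          apply ih
          exact ⟨rfl, rfl, h3, h4, fun x hx => by have := h5 x hx; omega⟩
        · obtain ⟨j, I⟩ := e
          simp only [List.concat_eq_append] at h3 h4 h5 ⊢
          have hgA : ((st' ++ [(j, I)]).map Prod.fst).getLast? = some j := by simp
          have hgB : (st' ++ [(j, I)]).getLast? = some (j, I) := by simp
          have hchain : finished.map Prod.fst ++ pvChain (st' ++ [(j, I)]) =
              (finished.map Prod.fst ++ pvChain st') ++ j :: I.map Prod.fst := by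
            simp [pvChain]
          rw [hchain] at h4 h5
          obtain ⟨hlt, hgt⟩ := pvPairSplit _ _ _ h4
          have hI : ∀ p ∈ I, j < p.1 := fun p hp => hgt p.1 (List.mem_map_of_mem hp)
          have hP : ∀ p ∈ finished ++ pvFlat st', p.1 < j := by
            intro p hp
            rcases List.mem_append.mp hp with hp | hp
            · exact hlt p.1 (List.mem_append_left _ (List.mem_map_of_mem hp))
            · exact hlt p.1 (List.mem_append_right _ (pvMem_chain_of_flat st' p hp))
          have hs2 : finished ++ pvFlat (st' ++ [(j, I)]) = (finished ++ pvFlat st') ++ I := by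
            simp [pvFlat]
          have hmerge := pvMerge_spec I (finished ++ pvFlat st') j (idx - j) hI hP
          simp only [hgA, hgB, hs2, hmerge]
          have harea : pvSumAreas ((finished ++ pvFlat st') ++ I) + (idx - j) =
              pvSumAreas ((finished ++ pvFlat st') ++ [(j, idx - j + pvSumAreas I)]) := by
            simp [pvSumAreas_eq]; ring
          have hjidx : j < idx := h5 j (by simp)
          rcases st'.eq_nil_or_concat with rfl | ⟨st'', e2, rfl⟩
          · rw [show (List.map Prod.fst (([] : List (Int × List (Int × Int))) ++ [(j, I)])).dropLast = [] from rfl,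
                show (([] : List (Int × List (Int × Int))) ++ [(j, I)]).dropLast = [] from rfl]
            show calcA rest (idx + 1) [] (finished ++ pvFlat [] ++ [(j, idx - j + pvSumAreas I)]) (area + (idx - j)) =
              calcB rest (idx + 1) [] (finished ++ [(j, idx - j + pvSumAreas I)])
            apply ih
            refine ⟨by simp, by simp [pvFlat], ?_, ?_, ?_⟩
            · rw [h3, hs2, harea]
            · have hsub : List.Sublist (finished.map Prod.fst ++ [j])
                  ((finished.map Prod.fst ++ pvChain ([] : List (Int × List (Int × Int)))) ++ j :: I.map Prod.fst) := by
                simp only [pvChain, List.flatMap_nil, List.append_nil]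
                exact pvSublistCons (finished.map Prod.fst) (I.map Prod.fst) j
              simpa [pvChain] using h4.sublist hsub
            · intro x hx
              simp only [pvChain, List.flatMap_nil, List.append_nil, List.map_append] at hx
              rcases List.mem_append.mp hx with hx | hx
              · have := h5 x (List.mem_append_left _ (List.mem_append_left _ hx)); omega
              · simp at hx; omega
          · obtain ⟨j2, I2⟩ := e2
            simp only [List.concat_eq_append] at h3 h4 h5 hI hP hs2 hmerge harea ⊢
            have hgB2 : (st'' ++ [(j2, I2)]).getLast? = some (j2, I2) := by simp
            simp only [hgB2, List.dropLast_concat]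
            apply ih
            set pond : Int × Int := (j, idx - j + pvSumAreas I) with hpond
            refine ⟨by simp, ?_, ?_, ?_, ?_⟩
            · simp [pvFlat]
            · rw [h3, hs2, harea]
            · have hcn : finished.map Prod.fst ++ pvChain (st'' ++ [(j2, I2 ++ [pond])]) =
                  (finished.map Prod.fst ++ pvChain (st'' ++ [(j2, I2)])) ++ [j] := by
                simp [pvChain, hpond]
              rw [hcn]
              exact h4.sublist (pvSublistCons _ _ _)
            · intro x hx
              have hcn : finished.map Prod.fst ++ pvChain (st'' ++ [(j2, I2 ++ [pond])]) =
                  (finished.map Prod.fst ++ pvChain (st'' ++ [(j2, I2)])) ++ [j] := by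
                simp [pvChain, hpond]
              rw [hcn] at hx
              rcases List.mem_append.mp hx with hx | hx
              · have := h5 x (List.mem_append_left _ hx); omega
              · simp at hx; omega
      · simp only [calcA, calcB, if_neg hb, if_neg hsl]
        apply ih
        exact ⟨rfl, rfl, h3, h4, fun x hx => by have := h5 x hx; omega⟩

-- ===== VERDICT (by name: the statement is the Claim_ definition above) =====
theorem calcurate_spec : Claim_equal_calcurate := by
  intro s _
  unfold Spec_calcurate calcurate calcurate_alt
  exact pvMain s.toList 0 [] [] 0 [] [] (by simp [pvInv, pvFlat, pvChain, pvSumAreas])
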